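-- pv_equiv track=rewrite | github.com/leanprover-community/mathlib4 | Mathlib/Util/lint_backticks_comments.py | extract_backticks
-- ===== SOURCE A (Python) =====
-- def extract_backticks(text):
--     # Replace triple backticks by single ones (as markdown code block use this).
--     text = text.replace("```", "`")
--     # Split the text by single backticks and take the odd-indexed hits.
--     # This means an
--     parts = text.split('`')
--     output = []
--     for (idx, s) in enumerate(parts):
--         if idx % 2 == 1:
--             output.append(s)
--     return output
-- ===== SOURCE B (Python) =====
-- def extract_backticks(text):
--     # Same triple-backtick normalisation, then a single character-level scan
--     # with an inside-backticks flag and a buffer instead of split + parity filter.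
--     text = text.replace("```", "`")
--     output = []
--     buf = []
--     inside = False
--     for ch in text:
--         if ch == '`':
--             if inside:
--                 output.append(''.join(buf))
--                 buf = []
--                 inside = False
--             else:
--                 inside = True
--         elif inside:
--             buf.append(ch)
--     if inside:
--         output.append(''.join(buf))
--     return output
-- ===== Notes on version B (the rewrite author's own statement) =====
-- stated objective: alternative
-- what changed: Replaces split-by-backtick plus enumerate/parity filtering with a single character-level state machine (inside flag + buffer) that collects the content between backticks in one pass.
import Mathlib
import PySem

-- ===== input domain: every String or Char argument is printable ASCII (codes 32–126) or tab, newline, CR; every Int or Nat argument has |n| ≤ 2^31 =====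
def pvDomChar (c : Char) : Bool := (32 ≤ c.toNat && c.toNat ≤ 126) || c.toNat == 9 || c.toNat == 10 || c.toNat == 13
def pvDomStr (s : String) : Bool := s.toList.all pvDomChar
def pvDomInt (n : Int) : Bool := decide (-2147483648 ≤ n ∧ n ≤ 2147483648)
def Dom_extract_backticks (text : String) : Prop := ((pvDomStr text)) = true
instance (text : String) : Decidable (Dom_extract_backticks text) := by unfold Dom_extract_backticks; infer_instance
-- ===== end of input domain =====

-- B replaces split + enumerate/parity filtering by a one-pass character state machine
-- (inside flag + buffer); same result, an alternative decomposition (no speed claim).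

-- ===== PORT A =====
def extract_backticks (text : String) : List String :=
  -- text = text.replace("```", "`")
  let text2 := PySem.Str.replace text "```" "`"
  -- parts = text.split('`')  (sep nonempty, so the total splitOn form)
  let parts := (PySem.Chars.splitOn text2.toList ['`']).map String.mk
  -- for (idx, s) in enumerate(parts): if idx % 2 == 1: output.append(s)
  (PySem.List.enumerate parts).foldl
    (fun output p => if PySem.Int.mod p.1 2 == 1 then output ++ [p.2] else output) []

-- ===== PORT B =====
-- the for-loop of Source B over the characters, state = (inside, buf, output);
-- the trailing 'if inside' flush is the [] case
def pvBGo (cs : List Char) (inside : Bool) (buf : List Char) (out : List String) : List String :=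
  match cs with
  | [] => if inside then out ++ [String.mk buf] else out
  | c :: rest =>
    if c = '`' then
      if inside then pvBGo rest false [] (out ++ [String.mk buf])
      else pvBGo rest true buf out
    else if inside then pvBGo rest inside (buf ++ [c]) out
    else pvBGo rest inside buf out

def extract_backticks_alt (text : String) : List String :=
  pvBGo (PySem.Str.replace text "```" "`").toList false [] []

-- ===== PRECONDITION & SPEC =====
def Spec_extract_backticks (text : String) (out : List String) : Prop := out = extract_backticks_alt text
instance (text : String) (out : List String) : Decidable (Spec_extract_backticks text out) := by unfold Spec_extract_backticks; infer_instance

-- ===== CLAIM (what is proved, stated in full; the proofs are below) =====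
def Claim_equal_extract_backticks : Prop := ∀ (text : String), Dom_extract_backticks text → Spec_extract_backticks text (extract_backticks text)

-- ===== LEMMAS AND PROOFS =====

-- structural form of splitOn on the single-char separator '`'
def pvSp (cs : List Char) : List (List Char) :=
  match cs with
  | [] => [[]]
  | c :: rest => if c = '`' then [] :: pvSp rest else (pvSp rest).modifyHead (c :: ·)

theorem pvSp_ne_nil (cs : List Char) : pvSp cs ≠ [] := by
  cases cs with
  | nil => simp [pvSp]
  | cons c rest =>
    simp only [pvSp]
    split
    · simp
    · cases h : pvSp rest with
      | nil => exact absurd h (pvSp_ne_nil rest)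
      | cons a t => simp

theorem pvGo_eq (cs : List Char) : ∀ (fuel : Nat) (cur : List Char) (acc : List (List Char)),
    cs.length ≤ fuel →
    PySem.Chars.splitOn.go ['`'] fuel cs cur acc
      = acc.reverse ++ (pvSp cs).modifyHead (cur.reverse ++ ·) := by
  induction cs with
  | nil =>
    intro fuel cur acc _
    cases fuel <;> simp [PySem.Chars.splitOn.go, pvSp]
  | cons c rest ih =>
    intro fuel cur acc hle
    cases fuel with
    | zero => simp at hle
    | succ f =>
      simp only [PySem.Chars.splitOn.go]
      by_cases hc : c = '`'
      · subst hc
        have hpre : List.isPrefixOf ['`'] ('`' :: rest) = true := by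
          simp [List.isPrefixOf]
        rw [if_pos hpre]
        simp only [List.length_cons] at hle
        rw [show List.drop (['`'].length) ('`' :: rest) = rest by simp]
        rw [ih f [] (cur.reverse :: acc) (by omega)]
        simp only [pvSp, if_pos rfl]
        cases pvSp rest <;> simp
      · have hpre : List.isPrefixOf ['`'] (c :: rest) = false := by
          simp [List.isPrefixOf]
          intro h; exact absurd h.symm hc
        rw [if_neg (by simp [hpre])]
        simp only [List.length_cons] at hle
        rw [ih f (c :: cur) acc (by omega)]
        simp only [pvSp, if_neg hc]
        cases h : pvSp rest with
        | nil => exact absurd h (pvSp_ne_nil rest)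
        | cons a t => simp

theorem pvSplitOn_eq (cs : List Char) : PySem.Chars.splitOn cs ['`'] = pvSp cs := by
  unfold PySem.Chars.splitOn
  rw [pvGo_eq cs (cs.length + 1) [] [] (by omega)]
  cases h : pvSp cs with
  | nil => exact absurd h (pvSp_ne_nil cs)
  | cons a t => simp

-- elements at odd positions / all-from-head alternation
def pvOd {α : Type} : List α → List α
  | [] => []
  | [_] => []
  | _ :: b :: t => b :: pvOd t

def pvEv {α : Type} (l : List α) : List α :=
  match l with
  | [] => []
  | a :: t => a :: pvOd t

theorem pvOd_cons {α : Type} (a : α) (t : List α) : pvOd (a :: t) = pvEv t := by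
  cases t <;> simp [pvOd, pvEv]

theorem pvOd_map {α β : Type} (f : α → β) (l : List α) : pvOd (l.map f) = (pvOd l).map f := by
  induction l using pvOd.induct <;> simp_all [pvOd]

theorem pvOd_modifyHead {α : Type} (f : α → α) (l : List α) :
    pvOd (l.modifyHead f) = pvOd l := by
  cases l with
  | nil => rfl
  | cons a t => simp [List.modifyHead, pvOd_cons]

-- A's enumerate/parity loop collects exactly the odd-indexed elements
theorem pvFoldl_enum {α : Type} (l : List α) : ∀ (n : Int) (out0 : List α), 0 ≤ n →
    (PySem.List.enumerate l n).foldl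
      (fun output p => if PySem.Int.mod p.1 2 == 1 then output ++ [p.2] else output) out0
    = out0 ++ (if n % 2 = 0 then pvOd l else pvEv l) := by
  induction l with
  | nil => intro n out0 _; simp [PySem.List.enumerate, pvOd, pvEv]
  | cons a t ih =>
    intro n out0 hn
    simp only [PySem.List.enumerate, List.foldl_cons]
    have hmod : PySem.Int.mod n 2 = n % 2 := by simp [PySem.Int.mod, Int.fmod_eq_emod]
    by_cases h : n % 2 = 0
    · rw [if_neg (by simp [hmod, h])]
      rw [ih (n + 1) out0 (by omega)]
      rw [if_neg (by omega), if_pos h, pvOd_cons]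
    · rw [if_pos (by simp [hmod]; try omega)]
      rw [ih (n + 1) (out0 ++ [a]) (by omega)]
      rw [if_pos (by omega), if_neg h]
      simp [pvEv, pvOd_cons]

-- B's state machine computes the odd parts of pvSp
theorem pvBGo_eq (cs : List Char) :
    (∀ out, pvBGo cs false [] out = out ++ (pvOd (pvSp cs)).map String.mk) ∧
    (∀ buf out, pvBGo cs true buf out
        = out ++ (pvEv ((pvSp cs).modifyHead (buf ++ ·))).map String.mk) := by
  induction cs with
  | nil => constructor <;> intros <;> simp [pvBGo, pvSp, pvOd, pvEv, List.modifyHead]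
  | cons c rest ih =>
    constructor
    · intro out
      by_cases hc : c = '`'
      · subst hc
        simp only [pvBGo, if_pos rfl, if_neg (Bool.false_ne_true)]
        rw [ih.2 [] out]
        simp [pvSp, pvOd_cons]
        cases h : pvSp rest with
        | nil => exact absurd h (pvSp_ne_nil rest)
        | cons a t => simp [List.modifyHead]
      · simp only [pvBGo, if_neg hc, if_neg (Bool.false_ne_true)]
        rw [ih.1 out]
        simp [pvSp, if_neg hc, pvOd_modifyHead]
    · intro buf out
      by_cases hc : c = '`'
      · subst hc
        simp only [pvBGo, if_pos rfl]
        rw [ih.1 (out ++ [String.mk buf])]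
        simp only [pvSp, if_pos rfl]
        cases h : pvSp rest with
        | nil => exact absurd h (pvSp_ne_nil rest)
        | cons a t => simp [List.modifyHead, pvEv, pvOd_cons, pvEv]
      · simp only [pvBGo, if_neg hc]
        rw [ih.2 (buf ++ [c]) out]
        simp only [pvSp, if_neg hc]
        cases h : pvSp rest with
        | nil => exact absurd h (pvSp_ne_nil rest)
        | cons a t => simp [List.modifyHead]

-- ===== VERDICT (by name: the statement is the Claim_ definition above) =====
theorem extract_backticks_spec : Claim_equal_extract_backticks := by
  intro text _
  unfold Spec_extract_backticks extract_backticks extract_backticks_alt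
  simp only []
  rw [pvSplitOn_eq, pvFoldl_enum _ 0 [] (by omega), (pvBGo_eq _).1]
  simp [pvOd_map]
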